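-- pv_equiv track=rewrite | github.com/julianztz/2026Algo-DS | 0lc_questions/图最短路径模板代码.py | dijkstra_with_stops
-- ===== SOURCE A (Python) =====
-- import heapq
-- from typing import List, Dict, Tuple
--
-- def build_graph(edges: List[List[int]]) -> Dict[int, List[Tuple[int, int]]]:
--     """
--     将边列表转换为邻接表
--
--     输入: [[u, v, w], ...] 或 [[u, v], ...]（无权图时 w=1）
--     输出: {u: [(v, w), ...]}
--     """
--     graph = {}
--     for edge in edges:
--         u, v = edge[0], edge[1]
--         w = edge[2] if len(edge) > 2 else 1  # 默认权重为 1
--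
--         if u not in graph:
--             graph[u] = []
--         graph[u].append((v, w))
--
--     return graph
--
-- def dijkstra_with_stops(n: int, edges: List[List[int]], src: int, dst: int, k: int) -> int:
--     """
--     带 stops 限制的 Dijkstra
--
--     适用场景：
--     - 有权图
--     - 最多 k 个中间节点（stops）
--
--     关键点：
--     1. 状态是二维的：(node, stops)
--     2. 不能用简单的 visited 集合
--     3. 同一个节点可能需要在不同 stops 下被访问多次
--     """
--     # 构建图
--     graph = build_graph(edges)
--
--     # 优先队列：(cost, node, stops)
--     pq = [(0, src, 0)]
--
--     # 记录每个 (node, stops) 状态的最小 cost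
--     min_cost = {}  # {(node, stops): min_cost}
--
--     while pq:
--         cost, node, stops = heapq.heappop(pq)
--
--         # 到达目标节点，直接返回
--         if node == dst:
--             return cost
--
--         # 超过 stops 限制，跳过
--         if stops > k:
--             continue
--
--         # 检查是否已访问过这个状态
--         if (node, stops) in min_cost and cost >= min_cost[(node, stops)]:
--             continue
--
--         min_cost[(node, stops)] = cost
--
--         # 遍历邻居
--         for neighbor, weight in graph.get(node, []):
--             new_cost = cost + weight
--             new_stops = stops + 1  # 经过当前 node 到达 neighbor
--
--             # 如果新路径的 stops 在限制内
--             if new_stops <= k + 1: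
--                 if (neighbor, new_stops) not in min_cost or new_cost < min_cost[(neighbor, new_stops)]:
--                     heapq.heappush(pq, (new_cost, neighbor, new_stops))
--
--     return -1
-- ===== SOURCE B (Python) =====
-- def dijkstra_with_stops(n, edges, src, dst, k):
--     """Bounded Bellman-Ford: after r rounds dist[v] is the cheapest cost of a
--     path src->v using at most r edges; k+1 rounds allow k intermediate stops.
--     Stops early once a round changes nothing (a fixpoint of the relaxation)."""
--     dist = {src: 0}
--     for _ in range(max(k + 1, 0)):
--         new = dict(dist)
--         for e in edges:
--             u, v = e[0], e[1]
--             w = e[2] if len(e) > 2 else 1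
--             if u in dist:
--                 c = dist[u] + w
--                 if v not in new or c < new[v]:
--                     new[v] = c
--         if new == dist:
--             break
--         dist = new
--     return dist.get(dst, -1)
-- ===== Notes on version B (the rewrite author's own statement) =====
-- stated objective: alternative
-- what changed: Replaced the heap-based Dijkstra over (node, stops) states (priority queue + per-state min-cost dict) by bounded Bellman-Ford: at most k+1 relaxation rounds over the raw edge list with an early exit at the fixpoint, no heap and no adjacency-list construction.
-- outside the precondition, e.g. on dijkstra_with_stops(3, [[0, 1, 10], [0, 2, 100], [2, 1, -1000]], 0, 1, 5): A returns 10, B returns -900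
import Mathlib
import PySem

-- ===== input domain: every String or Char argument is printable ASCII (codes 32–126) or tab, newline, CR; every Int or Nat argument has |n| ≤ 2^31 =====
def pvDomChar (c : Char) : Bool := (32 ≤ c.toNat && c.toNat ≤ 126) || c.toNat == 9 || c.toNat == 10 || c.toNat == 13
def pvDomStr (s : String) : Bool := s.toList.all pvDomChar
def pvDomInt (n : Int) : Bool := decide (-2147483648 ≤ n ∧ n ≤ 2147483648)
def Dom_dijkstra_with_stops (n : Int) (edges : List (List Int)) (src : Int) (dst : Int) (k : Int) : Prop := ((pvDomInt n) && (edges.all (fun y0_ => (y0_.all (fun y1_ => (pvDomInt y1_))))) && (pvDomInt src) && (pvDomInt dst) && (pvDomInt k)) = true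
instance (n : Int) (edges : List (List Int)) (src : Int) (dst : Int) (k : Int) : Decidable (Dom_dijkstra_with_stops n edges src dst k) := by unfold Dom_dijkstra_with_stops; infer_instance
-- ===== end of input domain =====

-- B replaces A's heap-based Dijkstra over (node, stops) states by bounded Bellman-Ford:
-- at most k+1 relaxation rounds over the raw edge list, stopping at the fixpoint.

-- ===== PORT A =====
-- edge accessors: e[0], e[1], and `e[2] if len(e) > 2 else 1`
def pvU (e : List Int) : Int := PySem.List.pyGetD e 0 0
def pvV (e : List Int) : Int := PySem.List.pyGetD e 1 0
def pvW (e : List Int) : Int := if 2 < e.length then PySem.List.pyGetD e 2 1 else 1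

-- build_graph: adjacency dict {u: [(v, w), ...]} built by appending
def pvBuildGraph (edges : List (List Int)) : PySem.Dict Int (List (Int × Int)) :=
  edges.foldl (fun g e => g.insert (pvU e) (g.getD (pvU e) [] ++ [(pvV e, pvW e)])) PySem.Dict.empty

-- the heap is modelled as a multiset: heappop yields the lexicographically smallest
-- (cost, node, stops) triple, which is exactly the sequence of values Python's heap pops
def pvLexLe (a b : Int × Int × Int) : Bool :=
  a.1 < b.1 || (a.1 == b.1 && (a.2.1 < b.2.1 || (a.2.1 == b.2.1 && a.2.2 ≤ b.2.2)))

def pvMin (h : Int × Int × Int) (t : List (Int × Int × Int)) : Int × Int × Int :=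
  t.foldl (fun m x => if pvLexLe m x then m else x) h

-- `(node, stops) in min_cost and cost >= min_cost[(node, stops)]`
def pvPruned (mc : PySem.Dict (Int × Int) Int) (v s c : Int) : Bool :=
  match mc.get? (v, s) with
  | some m => decide (m ≤ c)
  | none => false

-- the inner `for neighbor, weight in graph.get(node, [])` push loop
def pvPushStep (k : Int) (mc' : PySem.Dict (Int × Int) Int) (c s : Int)
    (acc : List (Int × Int × Int)) (p : Int × Int) : List (Int × Int × Int) :=
  if s + 1 ≤ k + 1 then
    match mc'.get? (p.1, s + 1) with
    | none => acc ++ [(c + p.2, p.1, s + 1)]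
    | some mv => if c + p.2 < mv then acc ++ [(c + p.2, p.1, s + 1)] else acc
  else acc

def pvPushes (g : PySem.Dict Int (List (Int × Int))) (k : Int) (mc' : PySem.Dict (Int × Int) Int)
    (c v s : Int) : List (Int × Int × Int) :=
  (g.getD v []).foldl (pvPushStep k mc' c s) []

-- termination measure: each heap entry with stops s weighs (size g + 2)^((k+2-s)⁺);
-- a pop removes that weight and pushes at most (size g) entries one level deeper
def pvGraphSize (g : PySem.Dict Int (List (Int × Int))) : Nat :=
  (g.values.map List.length).sum

def pvWt (g : PySem.Dict Int (List (Int × Int))) (k : Int) (x : Int × Int × Int) : Nat :=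
  (pvGraphSize g + 2) ^ (k + 2 - x.2.2).toNat

theorem pvMin_mem (h : Int × Int × Int) (t : List (Int × Int × Int)) : pvMin h t ∈ h :: t := by
  suffices H : ∀ (l : List (Int × Int × Int)) (a : Int × Int × Int),
      l.foldl (fun m x => if pvLexLe m x then m else x) a = a ∨
      l.foldl (fun m x => if pvLexLe m x then m else x) a ∈ l by
    rcases H t h with h1 | h1
    · simp [pvMin, h1]
    · simp [pvMin, h1]
  intro l
  induction l with
  | nil => intro a; simp
  | cons b l ih =>
    intro a
    simp only [List.foldl_cons]
    by_cases hc : pvLexLe a b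
    · rcases ih a with h1 | h1 <;> simp [hc, h1]
    · rcases ih b with h1 | h1 <;> simp [hc, h1]

theorem pvWt_pos (g : PySem.Dict Int (List (Int × Int))) (k : Int) (x : Int × Int × Int) :
    1 ≤ pvWt g k x := Nat.one_le_iff_ne_zero.mpr (pow_ne_zero _ (by omega))

theorem pvSum_erase_eq (f : Int × Int × Int → Nat) {e : Int × Int × Int}
    {l : List (Int × Int × Int)} (he : e ∈ l) :
    ((l.erase e).map f).sum + f e = (l.map f).sum := by
  have hp := List.perm_cons_erase he
  have := (hp.map f).sum_eq
  simp only [List.map_cons, List.sum_cons] at this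
  omega

theorem pvAdj_len_le (g : PySem.Dict Int (List (Int × Int))) (u : Int) :
    (g.getD u []).length ≤ pvGraphSize g := by
  rcases hg : g.get? u with _ | l
  · rw [PySem.Dict.getD_eq_get?_getD, hg]; simp
  · rw [PySem.Dict.getD_eq_get?_getD, hg]
    have hmem : l ∈ g.values := by
      have := PySem.Dict.mem_items_of_get?_eq_some (d := g) hg
      exact List.mem_map_of_mem this
    have : l.length ∈ g.values.map List.length := List.mem_map_of_mem hmem
    exact List.single_le_sum (fun _ _ => Nat.zero_le _) _ this

theorem pvPushAux_mem (k : Int) (mc' : PySem.Dict (Int × Int) Int) (c s : Int)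
    (y : Int × Int × Int) :
    ∀ (l : List (Int × Int)) (acc : List (Int × Int × Int)),
      y ∈ l.foldl (pvPushStep k mc' c s) acc →
      y ∈ acc ∨ ∃ p ∈ l, y = (c + p.2, p.1, s + 1) := by
  intro l
  induction l with
  | nil => intro acc h; exact Or.inl h
  | cons p l ih =>
    intro acc h
    rcases ih _ h with h1 | ⟨q, hq, hy⟩
    · unfold pvPushStep at h1
      split at h1
      · split at h1
        · rcases List.mem_append.1 h1 with h2 | h2
          · exact Or.inl h2
          · exact Or.inr ⟨p, by simp, by simpa using h2⟩
        · split at h1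
          · rcases List.mem_append.1 h1 with h2 | h2
            · exact Or.inl h2
            · exact Or.inr ⟨p, by simp, by simpa using h2⟩
          · exact Or.inl h1
      · exact Or.inl h1
    · exact Or.inr ⟨q, by simp [hq], hy⟩

theorem pvPushAux_len (k : Int) (mc' : PySem.Dict (Int × Int) Int) (c s : Int) :
    ∀ (l : List (Int × Int)) (acc : List (Int × Int × Int)),
      (l.foldl (pvPushStep k mc' c s) acc).length ≤ acc.length + l.length := by
  intro l
  induction l with
  | nil => intro acc; simp
  | cons p l ih =>
    intro acc
    have h1 : (pvPushStep k mc' c s acc p).length ≤ acc.length + 1 := by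
      unfold pvPushStep
      split
      · split
        · simp
        · split <;> simp
      · simp
    calc ((p :: l).foldl (pvPushStep k mc' c s) acc).length
        = (l.foldl (pvPushStep k mc' c s) (pvPushStep k mc' c s acc p)).length := by simp
      _ ≤ (pvPushStep k mc' c s acc p).length + l.length := ih _
      _ ≤ acc.length + (l.length + 1) := by omega
      _ = acc.length + (p :: l).length := by simp

theorem pvPushes_wt_sum (g : PySem.Dict Int (List (Int × Int))) (k : Int)
    (mc' : PySem.Dict (Int × Int) Int) (c v s : Int) (hs : s ≤ k) :
    ((pvPushes g k mc' c v s).map (pvWt g k)).sum < pvWt g k (c, v, s) := by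
  set B := pvGraphSize g + 2 with hB
  have hexp : (k + 2 - s).toNat = (k + 1 - (s + 1)).toNat + 1 + 1 := by omega
  have hwt : ∀ y ∈ pvPushes g k mc' c v s, pvWt g k y = B ^ ((k + 1 - (s+1)).toNat + 1) := by
    intro y hy
    rcases pvPushAux_mem k mc' c s y _ _ hy with h1 | ⟨p, _, hy'⟩
    · simp at h1
    · subst hy'
      simp only [pvWt]
      congr 1
      omega
  have hlen : (pvPushes g k mc' c v s).length ≤ pvGraphSize g := by
    calc (pvPushes g k mc' c v s).length ≤ 0 + (g.getD v []).length := pvPushAux_len _ _ _ _ _ _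
      _ ≤ pvGraphSize g := by simpa using pvAdj_len_le g v
  have hsum : ((pvPushes g k mc' c v s).map (pvWt g k)).sum ≤
      (pvPushes g k mc' c v s).length * B ^ ((k + 1 - (s+1)).toNat + 1) := by
    have := List.sum_le_card_nsmul ((pvPushes g k mc' c v s).map (pvWt g k))
      (B ^ ((k + 1 - (s+1)).toNat + 1)) (by
        intro x hx
        rcases List.mem_map.1 hx with ⟨y, hy, rfl⟩
        exact le_of_eq (hwt y hy))
    simpa [smul_eq_mul] using this
  have hBpos : 0 < B ^ ((k + 1 - (s+1)).toNat + 1) := Nat.pow_pos (by omega)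
  calc ((pvPushes g k mc' c v s).map (pvWt g k)).sum
      ≤ (pvPushes g k mc' c v s).length * B ^ ((k + 1 - (s+1)).toNat + 1) := hsum
    _ ≤ pvGraphSize g * B ^ ((k + 1 - (s+1)).toNat + 1) := Nat.mul_le_mul_right _ hlen
    _ < B * B ^ ((k + 1 - (s+1)).toNat + 1) := by
        exact (Nat.mul_lt_mul_right hBpos).mpr (by omega)
    _ = pvWt g k (c, v, s) := by
        simp only [pvWt, hexp]
        ring

-- the `while pq:` loop of A
def pvALoop (g : PySem.Dict Int (List (Int × Int))) (dst k : Int)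
    (pq : List (Int × Int × Int)) (mc : PySem.Dict (Int × Int) Int) : Int :=
  match pq with
  | [] => -1
  | h :: t =>
    if (pvMin h t).2.1 = dst then (pvMin h t).1
    else if k < (pvMin h t).2.2 then pvALoop g dst k ((h :: t).erase (pvMin h t)) mc
    else if pvPruned mc (pvMin h t).2.1 (pvMin h t).2.2 (pvMin h t).1 then
      pvALoop g dst k ((h :: t).erase (pvMin h t)) mc
    else pvALoop g dst k
      ((h :: t).erase (pvMin h t) ++
        pvPushes g k (mc.insert ((pvMin h t).2.1, (pvMin h t).2.2) (pvMin h t).1)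
          (pvMin h t).1 (pvMin h t).2.1 (pvMin h t).2.2)
      (mc.insert ((pvMin h t).2.1, (pvMin h t).2.2) (pvMin h t).1)
termination_by ((pq.map (pvWt g k)).sum)
decreasing_by
  · have he := pvMin_mem h t
    have := pvSum_erase_eq (pvWt g k) he
    have := pvWt_pos g k (pvMin h t)
    omega
  · have he := pvMin_mem h t
    have := pvSum_erase_eq (pvWt g k) he
    have := pvWt_pos g k (pvMin h t)
    omega
  · have he := pvMin_mem h t
    have h1 := pvSum_erase_eq (pvWt g k) he
    have h2 := pvPushes_wt_sum g k (mc.insert ((pvMin h t).2.1, (pvMin h t).2.2) (pvMin h t).1)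
      (pvMin h t).1 (pvMin h t).2.1 (pvMin h t).2.2 (by omega)
    rw [List.map_append, List.sum_append]
    have : pvWt g k ((pvMin h t).1, (pvMin h t).2.1, (pvMin h t).2.2) = pvWt g k (pvMin h t) := rfl
    omega

def dijkstra_with_stops (n : Int) (edges : List (List Int)) (src : Int) (dst : Int) (k : Int) : Int :=
  pvALoop (pvBuildGraph edges) dst k [(0, src, 0)] PySem.Dict.empty

-- ===== PORT B =====
-- one relaxation `if u in dist: ...` reading the previous round's dist, writing nd
def pvRelax (dist : PySem.Dict Int Int) (nd : PySem.Dict Int Int) (e : List Int) :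
    PySem.Dict Int Int :=
  match dist.get? (pvU e) with
  | none => nd
  | some du =>
    match nd.get? (pvV e) with
    | none => nd.insert (pvV e) (du + pvW e)
    | some cv => if du + pvW e < cv then nd.insert (pvV e) (du + pvW e) else nd

-- the `for _ in range(max(k+1, 0))` loop with the early `if new == dist: break`
def pvBRounds (edges : List (List Int)) : Nat → PySem.Dict Int Int → PySem.Dict Int Int
  | 0, d => d
  | r + 1, d =>
    let nd := edges.foldl (pvRelax d) d
    if nd = d then d else pvBRounds edges r nd

def dijkstra_with_stops_alt (n : Int) (edges : List (List Int)) (src : Int) (dst : Int) (k : Int) : Int :=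
  (pvBRounds edges (max (k + 1) 0).toNat (PySem.Dict.empty.insert src 0)).getD dst (-1)

-- ===== PRECONDITION & SPEC =====
-- Pre_ excludes edges shorter than 2 entries (A raises IndexError there) and negative edge
-- weights, which lie outside Dijkstra's natural domain: there A's early-return Dijkstra can
-- return a cost that is not the minimum, an artefact of heap pop order.
def Pre_dijkstra_with_stops (n : Int) (edges : List (List Int)) (src : Int) (dst : Int) (k : Int) : Prop :=
  ∀ e ∈ edges, 2 ≤ e.length ∧ 0 ≤ pvW e
instance (n : Int) (edges : List (List Int)) (src : Int) (dst : Int) (k : Int) : Decidable (Pre_dijkstra_with_stops n edges src dst k) := by unfold Pre_dijkstra_with_stops; infer_instance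

def pvWitness_dijkstra_with_stops : Int × List (List Int) × Int × Int × Int :=
  (3, [[0, 1, 5], [1, 2, 3], [0, 2, 100]], 0, 2, 1)

def Spec_dijkstra_with_stops (n : Int) (edges : List (List Int)) (src : Int) (dst : Int) (k : Int) (out : Int) : Prop := out = dijkstra_with_stops_alt n edges src dst k
instance (n : Int) (edges : List (List Int)) (src : Int) (dst : Int) (k : Int) (out : Int) : Decidable (Spec_dijkstra_with_stops n edges src dst k out) := by unfold Spec_dijkstra_with_stops; infer_instance

-- ===== CLAIM (what is proved, stated in full; the proofs are below) =====
def Claim_equal_dijkstra_with_stops : Prop := ∀ (n : Int) (edges : List (List Int)) (src : Int) (dst : Int) (k : Int), Dom_dijkstra_with_stops n edges src dst k → Pre_dijkstra_with_stops n edges src dst k → Spec_dijkstra_with_stops n edges src dst k (dijkstra_with_stops n edges src dst k)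

-- ===== LEMMAS AND PROOFS =====

-- cost-reachability: pvReachE j v c = "some path src -> v with exactly j edges costs c",
-- pvReach s = "at most s edges", pvReachND additionally avoids dst at all non-final nodes
def pvReachE (edges : List (List Int)) (src : Int) : Nat → Int → Int → Prop
  | 0, v, c => v = src ∧ c = 0
  | j+1, v, c => ∃ e ∈ edges, pvV e = v ∧ ∃ c', pvReachE edges src j (pvU e) c' ∧ c = c' + pvW e

def pvReach (edges : List (List Int)) (src : Int) (s : Nat) (v c : Int) : Prop :=
  ∃ j ≤ s, pvReachE edges src j v c

def pvReachND (edges : List (List Int)) (src dst : Int) : Nat → Int → Int → Prop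
  | 0, v, c => v = src ∧ c = 0
  | j+1, v, c => ∃ e ∈ edges, pvV e = v ∧ pvU e ≠ dst ∧
      ∃ c', pvReachND edges src dst j (pvU e) c' ∧ c = c' + pvW e

def pvOptAt (P : Int → Prop) : Option Int → Prop
  | none => ∀ c, ¬ P c
  | some m => P m ∧ ∀ c, P c → m ≤ c

theorem pvOptAt_some {P : Int → Prop} {m : Int} :
    pvOptAt P (some m) ↔ P m ∧ ∀ c, P c → m ≤ c := Iff.rfl
theorem pvOptAt_none {P : Int → Prop} : pvOptAt P none ↔ ∀ c, ¬ P c := Iff.rfl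

def pvBFD (edges : List (List Int)) (src : Int) (r : Nat) : PySem.Dict Int Int :=
  (List.range r).foldl (fun d _ => edges.foldl (pvRelax d) d) (PySem.Dict.empty.insert src 0)

theorem pvIterAux (F : PySem.Dict Int Int → PySem.Dict Int Int) :
    ∀ (l : List Nat) (d : PySem.Dict Int Int),
      l.foldl (fun d _ => F d) d = F^[l.length] d := by
  intro l
  induction l with
  | nil => intro d; rfl
  | cons a l ih =>
    intro d
    rw [List.foldl_cons, ih, List.length_cons, Function.iterate_succ_apply]

theorem pvBRounds_eq (edges : List (List Int)) :
    ∀ (r : Nat) (d : PySem.Dict Int Int),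
      pvBRounds edges r d = (fun d => edges.foldl (pvRelax d) d)^[r] d := by
  intro r
  induction r with
  | zero => intro d; rfl
  | succ r ih =>
    intro d
    rw [pvBRounds]
    by_cases h : edges.foldl (pvRelax d) d = d
    · rw [if_pos h, Function.iterate_succ_apply, h, Function.iterate_fixed h]
    · rw [if_neg h, ih, Function.iterate_succ_apply]

theorem pvAlt_eq (n : Int) (edges : List (List Int)) (src dst k : Int) :
    dijkstra_with_stops_alt n edges src dst k =
      (pvBFD edges src (max (k + 1) 0).toNat).getD dst (-1) := by
  unfold dijkstra_with_stops_alt pvBFD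
  rw [pvBRounds_eq, pvIterAux, List.length_range]

theorem pvOptAt_congr {P Q : Int → Prop} (h : ∀ c, P c ↔ Q c) {o : Option Int}
    (ho : pvOptAt P o) : pvOptAt Q o := by
  cases o with
  | none => intro c hc; exact ho c ((h c).mpr hc)
  | some m => exact ⟨(h m).mp ho.1, fun c hc => ho.2 c ((h c).mpr hc)⟩

theorem pvRelax_opt (d nd : PySem.Dict Int Int) (e : List Int) (R Q : Int → Int → Prop)
    (hdu : pvOptAt (R (pvU e)) (d.get? (pvU e)))
    (hnd : ∀ v, pvOptAt (Q v) (nd.get? v)) :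
    ∀ v, pvOptAt (fun c => Q v c ∨ (pvV e = v ∧ ∃ c', R (pvU e) c' ∧ c = c' + pvW e))
      ((pvRelax d nd e).get? v) := by
  intro v
  unfold pvRelax
  rcases hget : d.get? (pvU e) with _ | du
  · show pvOptAt _ (nd.get? v)
    rw [hget] at hdu
    rw [pvOptAt_none] at hdu
    refine pvOptAt_congr (fun c => ?_) (hnd v)
    constructor
    · exact Or.inl
    · rintro (h | ⟨_, c', hc', _⟩)
      · exact h
      · exact absurd hc' (hdu c')
  · rw [hget] at hdu
    rw [pvOptAt_some] at hdu
    rcases hnd2 : nd.get? (pvV e) with _ | cv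
    · -- insert happens
      show pvOptAt _ ((nd.insert (pvV e) (du + pvW e)).get? v)
      have hQnone := hnd (pvV e); rw [hnd2, pvOptAt_none] at hQnone
      by_cases hv : pvV e = v
      · subst hv
        rw [PySem.Dict.get?_insert_self, pvOptAt_some]
        constructor
        · exact Or.inr ⟨rfl, du, hdu.1, rfl⟩
        · rintro c (hq | ⟨_, c', hc', rfl⟩)
          · exact absurd hq (hQnone c)
          · have := hdu.2 c' hc'; omega
      · rw [PySem.Dict.get?_insert_of_ne _ _ (fun h => hv h.symm)]
        refine pvOptAt_congr (fun c => ?_) (hnd v)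
        constructor
        · exact Or.inl
        · rintro (h | ⟨hve, _⟩)
          · exact h
          · exact absurd hve hv
    · show pvOptAt _ ((if du + pvW e < cv then nd.insert (pvV e) (du + pvW e) else nd).get? v)
      have hQ := hnd (pvV e); rw [hnd2, pvOptAt_some] at hQ
      by_cases hlt : du + pvW e < cv
      · rw [if_pos hlt]
        by_cases hv : pvV e = v
        · subst hv
          rw [PySem.Dict.get?_insert_self, pvOptAt_some]
          constructor
          · exact Or.inr ⟨rfl, du, hdu.1, rfl⟩
          · rintro c (hq | ⟨_, c', hc', rfl⟩)
            · exact le_of_lt (lt_of_lt_of_le hlt (hQ.2 c hq))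
            · have := hdu.2 c' hc'; omega
        · rw [PySem.Dict.get?_insert_of_ne _ _ (fun h => hv h.symm)]
          refine pvOptAt_congr (fun c => ?_) (hnd v)
          constructor
          · exact Or.inl
          · rintro (h | ⟨hve, _⟩)
            · exact h
            · exact absurd hve hv
      · rw [if_neg hlt]
        by_cases hv : pvV e = v
        · subst hv
          rw [hnd2, pvOptAt_some]
          constructor
          · exact Or.inl hQ.1
          · rintro c (hq | ⟨_, c', hc', rfl⟩)
            · exact hQ.2 c hq
            · have h1 := not_lt.mp hlt; have h2 := hdu.2 c' hc'; omega
        · refine pvOptAt_congr (fun c => ?_) (hnd v)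
          constructor
          · exact Or.inl
          · rintro (h | ⟨hve, _⟩)
            · exact h
            · exact absurd hve hv

theorem pvRelaxFold (d : PySem.Dict Int Int) (R : Int → Int → Prop)
    (hd : ∀ u, pvOptAt (R u) (d.get? u)) :
    ∀ (l : List (List Int)) (nd : PySem.Dict Int Int) (Q : Int → Int → Prop),
      (∀ v, pvOptAt (Q v) (nd.get? v)) →
      ∀ v, pvOptAt (fun c => Q v c ∨ ∃ e ∈ l, pvV e = v ∧ ∃ c', R (pvU e) c' ∧ c = c' + pvW e)
        ((l.foldl (pvRelax d) nd).get? v) := by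
  intro l
  induction l with
  | nil =>
    intro nd Q hnd v
    refine pvOptAt_congr (fun c => ?_) (hnd v)
    simp
  | cons e l ih =>
    intro nd Q hnd v
    simp only [List.foldl_cons]
    have h1 := ih (pvRelax d nd e)
      (fun v c => Q v c ∨ (pvV e = v ∧ ∃ c', R (pvU e) c' ∧ c = c' + pvW e))
      (pvRelax_opt d nd e R Q (hd (pvU e)) hnd) v
    refine pvOptAt_congr (fun c => ?_) h1
    constructor
    · rintro ((hq | he) | ⟨e', he', h⟩)
      · exact Or.inl hq
      · exact Or.inr ⟨e, by simp, he⟩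
      · exact Or.inr ⟨e', by simp [he'], h⟩
    · rintro (hq | ⟨e', he', h⟩)
      · exact Or.inl (Or.inl hq)
      · rcases List.mem_cons.mp he' with rfl | he'
        · exact Or.inl (Or.inr h)
        · exact Or.inr ⟨e', he', h⟩

theorem pvReach_succ (edges : List (List Int)) (src : Int) (r : Nat) (v c : Int) :
    pvReach edges src (r + 1) v c ↔
      pvReach edges src r v c ∨
        ∃ e ∈ edges, pvV e = v ∧ ∃ c', pvReach edges src r (pvU e) c' ∧ c = c' + pvW e := by
  constructor
  · rintro ⟨j, hj, hre⟩
    rcases Nat.lt_or_ge j (r + 1) with hlt | hge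
    · exact Or.inl ⟨j, by omega, hre⟩
    · have : j = r + 1 := by omega
      subst this
      rcases hre with ⟨e, he, hv, c', hc', rfl⟩
      exact Or.inr ⟨e, he, hv, c', ⟨r, le_refl _, hc'⟩, rfl⟩
  · rintro (⟨j, hj, hre⟩ | ⟨e, he, hv, c', ⟨j, hj, hc'⟩, rfl⟩)
    · exact ⟨j, by omega, hre⟩
    · exact ⟨j + 1, by omega, ⟨e, he, hv, c', hc', rfl⟩⟩

theorem pvReach_mono (edges : List (List Int)) (src : Int) {r r' : Nat} (h : r ≤ r')
    {v c : Int} : pvReach edges src r v c → pvReach edges src r' v c := by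
  rintro ⟨j, hj, hre⟩; exact ⟨j, by omega, hre⟩

theorem pvReach_step (edges : List (List Int)) (src : Int) {e : List Int} (he : e ∈ edges)
    {r : Nat} {c : Int} (h : pvReach edges src r (pvU e) c) :
    pvReach edges src (r + 1) (pvV e) (c + pvW e) := by
  rcases h with ⟨j, hj, hre⟩
  exact ⟨j + 1, by omega, ⟨e, he, rfl, c, hre, rfl⟩⟩

theorem pvReachE_nonneg (edges : List (List Int)) (src : Int)
    (hw : ∀ e ∈ edges, 0 ≤ pvW e) :
    ∀ (j : Nat) (v c : Int), pvReachE edges src j v c → 0 ≤ c := by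
  intro j
  induction j with
  | zero => rintro v c ⟨_, rfl⟩; omega
  | succ j ih =>
    rintro v c ⟨e, he, _, c', hc', rfl⟩
    have := ih _ _ hc'
    have := hw e he
    omega

theorem pvReach_nonneg (edges : List (List Int)) (src : Int)
    (hw : ∀ e ∈ edges, 0 ≤ pvW e) {r : Nat} {v c : Int}
    (h : pvReach edges src r v c) : 0 ≤ c := by
  rcases h with ⟨j, _, hre⟩; exact pvReachE_nonneg edges src hw j v c hre

theorem pvBFD_opt (edges : List (List Int)) (src : Int) :
    ∀ (r : Nat) (v : Int), pvOptAt (pvReach edges src r v) ((pvBFD edges src r).get? v) := by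
  intro r
  induction r with
  | zero =>
    intro v
    rw [pvBFD]
    simp only [List.range_zero, List.foldl_nil]
    rw [PySem.Dict.get?_insert]
    split
    · rename_i hv
      constructor
      · exact ⟨0, le_refl _, hv, rfl⟩
      · rintro c ⟨j, hj, hre⟩
        have : j = 0 := by omega
        subst this
        exact le_of_eq hre.2.symm
    · rename_i hv
      rw [PySem.Dict.get?_empty, pvOptAt]
      rintro c ⟨j, hj, hre⟩
      have : j = 0 := by omega
      subst this
      exact hv hre.1
  | succ r ih =>
    intro v
    have hstep : pvBFD edges src (r + 1) = edges.foldl (pvRelax (pvBFD edges src r)) (pvBFD edges src r) := by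
      rw [pvBFD, pvBFD, List.range_succ, List.foldl_append, List.foldl_cons, List.foldl_nil]
    rw [hstep]
    have h1 := pvRelaxFold (pvBFD edges src r) (pvReach edges src r) ih edges
      (pvBFD edges src r) (pvReach edges src r) ih v
    exact pvOptAt_congr (fun c => (pvReach_succ edges src r v c).symm) h1

theorem pvFirstHit (edges : List (List Int)) (src dst : Int)
    (hw : ∀ e ∈ edges, 0 ≤ pvW e) :
    ∀ (j : Nat) (v c : Int), pvReachE edges src j v c →
      (∃ j' ≤ j, ∃ c' ≤ c, pvReachND edges src dst j' v c') ∨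
      (∃ j' ≤ j, ∃ c' ≤ c, pvReachND edges src dst j' dst c') := by
  intro j
  induction j with
  | zero =>
    rintro v c ⟨rfl, rfl⟩
    exact Or.inl ⟨0, le_refl _, 0, le_refl _, rfl, rfl⟩
  | succ j ih =>
    rintro v c ⟨e, he, hv, c', hc', rfl⟩
    have hwe := hw e he
    rcases ih _ _ hc' with ⟨j', hj', c'', hc'', hnd⟩ | ⟨j', hj', c'', hc'', hnd⟩
    · by_cases hud : pvU e = dst
      · rw [hud] at hnd
        exact Or.inr ⟨j', by omega, c'', by omega, hnd⟩
      · exact Or.inl ⟨j' + 1, by omega, c'' + pvW e, by omega,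
          ⟨e, he, hv, hud, c'', hnd, rfl⟩⟩
    · exact Or.inr ⟨j', by omega, c'', by omega, hnd⟩

theorem pvReachND_of_reach (edges : List (List Int)) (src dst : Int)
    (hw : ∀ e ∈ edges, 0 ≤ pvW e) {r : Nat} {c : Int}
    (h : pvReach edges src r dst c) :
    ∃ j ≤ r, ∃ c' ≤ c, pvReachND edges src dst j dst c' := by
  rcases h with ⟨j, hj, hre⟩
  rcases pvFirstHit edges src dst hw j dst c hre with ⟨j', hj', c', hc', hnd⟩ | ⟨j', hj', c', hc', hnd⟩
  · exact ⟨j', by omega, c', hc', hnd⟩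
  · exact ⟨j', by omega, c', hc', hnd⟩

-- ===== A-side invariants =====

def pvSoundE (edges : List (List Int)) (src k : Int) (x : Int × Int × Int) : Prop :=
  0 ≤ x.2.2 ∧ x.2.2 ≤ k + 1 ∧ pvReach edges src x.2.2.toNat x.2.1 x.1

def pvWitAt (pq : List (Int × Int × Int)) (mc : PySem.Dict (Int × Int) Int)
    (v s b : Int) : Prop :=
  (∃ c', (c', v, s) ∈ pq ∧ c' ≤ b) ∨ (∃ m, mc.get? (v, s) = some m ∧ m ≤ b)

def pvInv (edges : List (List Int)) (g : PySem.Dict Int (List (Int × Int)))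
    (src dst k : Int) (pq : List (Int × Int × Int)) (mc : PySem.Dict (Int × Int) Int) : Prop :=
  (∀ x ∈ pq, pvSoundE edges src k x) ∧
  (∀ v s m, mc.get? (v, s) = some m → 0 ≤ s ∧ s ≤ k ∧
     ∀ p ∈ g.getD v [], (s + 1 ≤ k ∨ p.1 = dst) → pvWitAt pq mc p.1 (s + 1) (m + p.2)) ∧
  pvWitAt pq mc src 0 0 ∧
  (∀ s, mc.get? (dst, s) = none)

theorem pvBuildGraph_mem (edges : List (List Int)) (p : Int × Int) (u : Int) :
    p ∈ (pvBuildGraph edges).getD u [] ↔ ∃ e ∈ edges, pvU e = u ∧ p = (pvV e, pvW e) := by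
  suffices H : ∀ (l : List (List Int)) (g : PySem.Dict Int (List (Int × Int))),
      p ∈ (l.foldl (fun g e => g.insert (pvU e) (g.getD (pvU e) [] ++ [(pvV e, pvW e)])) g).getD u []
      ↔ p ∈ g.getD u [] ∨ ∃ e ∈ l, pvU e = u ∧ p = (pvV e, pvW e) by
    rw [pvBuildGraph, H]
    simp [PySem.Dict.getD_empty]
  intro l
  induction l with
  | nil => intro g; simp
  | cons e l ih =>
    intro g
    simp only [List.foldl_cons]
    rw [ih]
    rw [PySem.Dict.getD_insert]
    constructor
    · rintro (h | ⟨e', he', h1, h2⟩)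
      · split at h
        · rename_i hu
          subst hu
          rcases List.mem_append.mp h with h | h
          · exact Or.inl h
          · simp only [List.mem_singleton] at h
            exact Or.inr ⟨e, by simp, rfl, h⟩
        · exact Or.inl h
      · exact Or.inr ⟨e', by simp [he'], h1, h2⟩
    · rintro (h | ⟨e', he', h1, h2⟩)
      · split
        · rename_i hu
          subst hu
          exact Or.inl (List.mem_append_left _ h)
        · exact Or.inl h
      · rcases List.mem_cons.mp he' with rfl | he'
        · subst h1
          left
          rw [if_pos rfl]
          exact List.mem_append_right _ (by simp [h2])
        · exact Or.inr ⟨e', he', h1, h2⟩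

theorem pvLexLe_true {a b : Int × Int × Int} (h : pvLexLe a b = true) : a.1 ≤ b.1 := by
  simp only [pvLexLe, Bool.or_eq_true, Bool.and_eq_true, decide_eq_true_eq, beq_iff_eq] at h
  rcases h with h | ⟨h, _⟩ <;> omega

theorem pvLexLe_false {a b : Int × Int × Int} (h : pvLexLe a b = false) : b.1 ≤ a.1 := by
  simp only [pvLexLe, Bool.or_eq_false_iff, Bool.and_eq_false_iff] at h
  rcases h with ⟨h1, h2⟩
  simp only [decide_eq_false_iff_not, not_lt] at h1
  exact h1

theorem pvMin_le (h : Int × Int × Int) (t : List (Int × Int × Int)) :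
    ∀ x ∈ h :: t, (pvMin h t).1 ≤ x.1 := by
  suffices H : ∀ (l : List (Int × Int × Int)) (a : Int × Int × Int),
      (l.foldl (fun m x => if pvLexLe m x then m else x) a).1 ≤ a.1 ∧
      ∀ x ∈ l, (l.foldl (fun m x => if pvLexLe m x then m else x) a).1 ≤ x.1 by
    intro x hx
    rcases List.mem_cons.mp hx with rfl | hx
    · exact (H t x).1
    · exact (H t h).2 x hx
  intro l
  induction l with
  | nil => intro a; exact ⟨le_refl _, by simp⟩
  | cons b l ih =>
    intro a
    simp only [List.foldl_cons]
    by_cases hc : pvLexLe a b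
    · rw [if_pos hc]
      refine ⟨(ih a).1, fun x hx => ?_⟩
      rcases List.mem_cons.mp hx with rfl | hx
      · exact le_trans (ih a).1 (pvLexLe_true hc)
      · exact (ih a).2 x hx
    · rw [if_neg hc]
      have hba : b.1 ≤ a.1 := pvLexLe_false (Bool.of_not_eq_true hc)
      refine ⟨le_trans (ih b).1 hba, fun x hx => ?_⟩
      rcases List.mem_cons.mp hx with rfl | hx
      · exact (ih _).1
      · exact (ih b).2 x hx

theorem pvChainAux (edges : List (List Int)) (g : PySem.Dict Int (List (Int × Int)))
    (src dst k : Int) (pq : List (Int × Int × Int)) (mc : PySem.Dict (Int × Int) Int)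
    (hg : ∀ p u, p ∈ g.getD u [] ↔ ∃ e ∈ edges, pvU e = u ∧ p = (pvV e, pvW e))
    (hw : ∀ e ∈ edges, 0 ≤ pvW e)
    (inv : pvInv edges g src dst k pq mc) :
    ∀ (j : Nat) (v c : Int), pvReachND edges src dst j v c → v ≠ dst → (j : Int) ≤ k →
      (∃ x ∈ pq, x.1 ≤ c) ∨ (∃ m, mc.get? (v, (j : Int)) = some m ∧ m ≤ c) := by
  intro j
  induction j with
  | zero =>
    intro v c h _ _
    obtain ⟨hv, hc⟩ := h
    subst hc
    rw [hv]
    rcases inv.2.2.1 with ⟨c', hmem, hle⟩ | ⟨m, hm, hle⟩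
    · exact Or.inl ⟨(c', src, 0), hmem, hle⟩
    · exact Or.inr ⟨m, by exact_mod_cast hm, hle⟩
  | succ j ih =>
    rintro v c ⟨e, he, hv, hud, c', hnd, rfl⟩ hvd hj
    have hwe := hw e he
    rcases ih (pvU e) c' hnd hud (by push_cast at hj ⊢; omega) with ⟨x, hx, hxle⟩ | ⟨m, hm, hmle⟩
    · exact Or.inl ⟨x, hx, by omega⟩
    · have hmc := inv.2.1 (pvU e) (j : Int) m hm
      have hp : (pvV e, pvW e) ∈ g.getD (pvU e) [] := (hg _ _).mpr ⟨e, he, rfl, rfl⟩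
      have hcond : (j : Int) + 1 ≤ k ∨ (pvV e, pvW e).1 = dst := by
        left; push_cast at hj; omega
      rcases hmc.2.2 (pvV e, pvW e) hp hcond with ⟨c'', hmem, hle⟩ | ⟨m', hm', hle⟩
      · exact Or.inl ⟨(c'', pvV e, (j : Int) + 1), hmem, by omega⟩
      · rw [hv] at hm'
        refine Or.inr ⟨m', ?_, by omega⟩
        have hcast : (((j + 1 : Nat)) : Int) = (j : Int) + 1 := by push_cast; ring
        rw [hcast]
        exact hm'

theorem pvChainDst (edges : List (List Int)) (g : PySem.Dict Int (List (Int × Int)))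
    (src dst k : Int) (pq : List (Int × Int × Int)) (mc : PySem.Dict (Int × Int) Int)
    (hg : ∀ p u, p ∈ g.getD u [] ↔ ∃ e ∈ edges, pvU e = u ∧ p = (pvV e, pvW e))
    (hw : ∀ e ∈ edges, 0 ≤ pvW e)
    (hsd : src ≠ dst)
    (inv : pvInv edges g src dst k pq mc) :
    ∀ (j : Nat) (c : Int), pvReachND edges src dst j dst c → (j : Int) ≤ k + 1 →
      ∃ x ∈ pq, x.1 ≤ c := by
  intro j c hnd hj
  cases j with
  | zero => exact absurd hnd.1.symm hsd
  | succ j =>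
    rcases hnd with ⟨e, he, hv, hud, c', hnd', rfl⟩
    have hwe := hw e he
    rcases pvChainAux edges g src dst k pq mc hg hw inv j (pvU e) c' hnd' hud
        (by push_cast at hj ⊢; omega) with ⟨x, hx, hxle⟩ | ⟨m, hm, hmle⟩
    · exact ⟨x, hx, by omega⟩
    · have hmc := inv.2.1 (pvU e) (j : Int) m hm
      have hp : (pvV e, pvW e) ∈ g.getD (pvU e) [] := (hg _ _).mpr ⟨e, he, rfl, rfl⟩
      rcases hmc.2.2 (pvV e, pvW e) hp (Or.inr hv) with ⟨c'', hmem, hle⟩ | ⟨m', hm', _⟩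
      · exact ⟨(c'', pvV e, (j : Int) + 1), hmem, by omega⟩
      · rw [hv] at hm'
        exact absurd hm' (by rw [inv.2.2.2 ((j : Int) + 1)]; simp)

-- witness-transfer lemmas for the three loop branches

theorem pvWitAt_erase_ne {pq : List (Int × Int × Int)} {mc : PySem.Dict (Int × Int) Int}
    {v s b : Int} {e : Int × Int × Int}
    (hwit : pvWitAt pq mc v s b) (hne : (v, s) ≠ (e.2.1, e.2.2)) :
    pvWitAt (pq.erase e) mc v s b := by
  rcases hwit with ⟨c', hmem, hle⟩ | hmc
  · exact Or.inl ⟨c',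
      (List.mem_erase_of_ne (fun hx => hne (congrArg Prod.snd hx))).mpr hmem, hle⟩
  · exact Or.inr hmc

theorem pvWitAt_erase_pruned {pq : List (Int × Int × Int)} {mc : PySem.Dict (Int × Int) Int}
    {v s b m : Int} {e : Int × Int × Int}
    (hwit : pvWitAt pq mc v s b)
    (hm : mc.get? (e.2.1, e.2.2) = some m) (hmle : m ≤ e.1) :
    pvWitAt (pq.erase e) mc v s b := by
  rcases hwit with ⟨c', hmem, hle⟩ | hmc
  · by_cases hx : (c', v, s) = e
    · have hvs : ((v, s) : Int × Int) = (e.2.1, e.2.2) := congrArg Prod.snd hx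
      have hc : c' = e.1 := congrArg Prod.fst hx
      right
      exact ⟨m, by rw [hvs]; exact hm, by omega⟩
    · exact Or.inl ⟨c', (List.mem_erase_of_ne hx).mpr hmem, hle⟩
  · exact Or.inr hmc

theorem pvWitAt_record {pq P : List (Int × Int × Int)} {mc : PySem.Dict (Int × Int) Int}
    {v s b : Int} {e : Int × Int × Int}
    (hwit : pvWitAt pq mc v s b)
    (hnp : pvPruned mc e.2.1 e.2.2 e.1 = false) :
    pvWitAt (pq.erase e ++ P) (mc.insert (e.2.1, e.2.2) e.1) v s b := by
  rcases hwit with ⟨c', hmem, hle⟩ | ⟨m, hm, hle⟩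
  · by_cases hx : (c', v, s) = e
    · have hvs : ((v, s) : Int × Int) = (e.2.1, e.2.2) := congrArg Prod.snd hx
      have hc : c' = e.1 := congrArg Prod.fst hx
      right
      exact ⟨e.1, by rw [hvs]; exact PySem.Dict.get?_insert_self _ _ _, by omega⟩
    · exact Or.inl ⟨c', List.mem_append_left _ ((List.mem_erase_of_ne hx).mpr hmem), hle⟩
  · by_cases hvs : ((v, s) : Int × Int) = (e.2.1, e.2.2)
    · right
      refine ⟨e.1, by rw [hvs]; exact PySem.Dict.get?_insert_self _ _ _, ?_⟩
      rw [hvs] at hm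
      unfold pvPruned at hnp
      rw [hm] at hnp
      simp only [decide_eq_false_iff_not, not_le] at hnp
      omega
    · exact Or.inr ⟨m, by rw [PySem.Dict.get?_insert_of_ne _ _ hvs]; exact hm, hle⟩

theorem pvInv_stopskip {edges : List (List Int)} {g : PySem.Dict Int (List (Int × Int))}
    {src dst k : Int} {pq : List (Int × Int × Int)} {mc : PySem.Dict (Int × Int) Int}
    {e : Int × Int × Int}
    (inv : pvInv edges g src dst k pq mc) (hdst : e.2.1 ≠ dst) (hs : k < e.2.2)
    (hk : 0 ≤ k) :
    pvInv edges g src dst k (pq.erase e) mc := by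
  refine ⟨fun x hx => inv.1 x ((List.erase_sublist).subset hx), ?_, ?_, inv.2.2.2⟩
  · intro v s m hm
    have h1 := inv.2.1 v s m hm
    refine ⟨h1.1, h1.2.1, fun p hp hcond => ?_⟩
    refine pvWitAt_erase_ne (h1.2.2 p hp hcond) ?_
    rcases hcond with hc | hc
    · intro hcontra
      simp only [Prod.mk.injEq] at hcontra
      omega
    · intro hcontra
      simp only [Prod.mk.injEq] at hcontra
      rw [← hcontra.1] at hdst
      exact hdst hc
  · refine pvWitAt_erase_ne inv.2.2.1 ?_
    intro hcontra
    simp only [Prod.mk.injEq] at hcontra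
    omega

theorem pvInv_pruneskip {edges : List (List Int)} {g : PySem.Dict Int (List (Int × Int))}
    {src dst k : Int} {pq : List (Int × Int × Int)} {mc : PySem.Dict (Int × Int) Int}
    {e : Int × Int × Int} {m : Int}
    (inv : pvInv edges g src dst k pq mc)
    (hm : mc.get? (e.2.1, e.2.2) = some m) (hmle : m ≤ e.1) :
    pvInv edges g src dst k (pq.erase e) mc := by
  refine ⟨fun x hx => inv.1 x ((List.erase_sublist).subset hx), ?_, ?_, inv.2.2.2⟩
  · intro v s m' hm'
    have h1 := inv.2.1 v s m' hm'
    exact ⟨h1.1, h1.2.1, fun p hp hcond =>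
      pvWitAt_erase_pruned (h1.2.2 p hp hcond) hm hmle⟩
  · exact pvWitAt_erase_pruned inv.2.2.1 hm hmle

theorem pvPushAux_acc_mono (k : Int) (mc' : PySem.Dict (Int × Int) Int) (c s : Int)
    {y : Int × Int × Int} :
    ∀ (l : List (Int × Int)) (acc : List (Int × Int × Int)),
      y ∈ acc → y ∈ l.foldl (pvPushStep k mc' c s) acc := by
  intro l
  induction l with
  | nil => intro acc h; exact h
  | cons p l ih =>
    intro acc h
    apply ih
    unfold pvPushStep
    split
    · split
      · exact List.mem_append_left _ h
      · split
        · exact List.mem_append_left _ h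
        · exact h
    · exact h

theorem pvPushes_cover (g : PySem.Dict Int (List (Int × Int))) (k : Int)
    (mc' : PySem.Dict (Int × Int) Int) (c v s : Int) (hs : s ≤ k) :
    ∀ p ∈ g.getD v [],
      ((c + p.2, p.1, s + 1) ∈ pvPushes g k mc' c v s) ∨
      (∃ mv, mc'.get? (p.1, s + 1) = some mv ∧ mv ≤ c + p.2) := by
  suffices H : ∀ (l : List (Int × Int)) (acc : List (Int × Int × Int)), ∀ p ∈ l,
      ((c + p.2, p.1, s + 1) ∈ l.foldl (pvPushStep k mc' c s) acc) ∨
      (∃ mv, mc'.get? (p.1, s + 1) = some mv ∧ mv ≤ c + p.2) from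
    fun p hp => H _ [] p hp
  intro l
  induction l with
  | nil => intro acc p hp; simp at hp
  | cons q l ih =>
    intro acc p hp
    rcases List.mem_cons.mp hp with rfl | hp
    · simp only [List.foldl_cons]
      have hstep : pvPushStep k mc' c s acc p = acc ++ [(c + p.2, p.1, s + 1)] ∨
          ∃ mv, mc'.get? (p.1, s + 1) = some mv ∧ mv ≤ c + p.2 := by
        rcases hq : mc'.get? (p.1, s + 1) with _ | mv
        · left
          unfold pvPushStep
          rw [if_pos (by omega : s + 1 ≤ k + 1), hq]
        · by_cases hlt : c + p.2 < mv
          · left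
            unfold pvPushStep
            rw [if_pos (by omega : s + 1 ≤ k + 1), hq]
            show (if c + p.2 < mv then acc ++ [(c + p.2, p.1, s + 1)] else acc) = _
            rw [if_pos hlt]
          · exact Or.inr ⟨mv, rfl, by omega⟩
      rcases hstep with hstep | hstep
      · left
        apply pvPushAux_acc_mono
        rw [hstep]
        exact List.mem_append_right _ (by simp)
      · exact Or.inr hstep
    · simp only [List.foldl_cons]
      exact ih _ p hp

theorem pvInv_record {edges : List (List Int)} {g : PySem.Dict Int (List (Int × Int))}
    {src dst k : Int} {pq : List (Int × Int × Int)} {mc : PySem.Dict (Int × Int) Int}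
    {e : Int × Int × Int}
    (hg : ∀ p u, p ∈ g.getD u [] ↔ ∃ e ∈ edges, pvU e = u ∧ p = (pvV e, pvW e))
    (inv : pvInv edges g src dst k pq mc) (he : e ∈ pq) (hdst : e.2.1 ≠ dst)
    (hsk : ¬ k < e.2.2)
    (hnp : pvPruned mc e.2.1 e.2.2 e.1 = false) :
    pvInv edges g src dst k
      (pq.erase e ++ pvPushes g k (mc.insert ((e.2.1, e.2.2)) e.1) e.1 e.2.1 e.2.2)
      (mc.insert ((e.2.1, e.2.2)) e.1) := by
  have hse := inv.1 e he
  refine ⟨?_, ?_, pvWitAt_record inv.2.2.1 hnp, ?_⟩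
  · intro x hx
    rcases List.mem_append.mp hx with hx | hx
    · exact inv.1 x ((List.erase_sublist).subset hx)
    · rcases pvPushAux_mem k _ e.1 e.2.2 x _ _ hx with h1 | ⟨p, hp, rfl⟩
      · simp at h1
      · rcases (hg _ _).mp hp with ⟨ed, hed, hu, hpv⟩
        have hs0 : 0 ≤ e.2.2 := hse.1
        refine ⟨by simp; omega, by simp; omega, ?_⟩
        have hstep := pvReach_step edges src hed (by rw [hu]; exact hse.2.2)
        have htn : (e.2.2 + 1).toNat = e.2.2.toNat + 1 := by omega
        simp only [htn]
        rw [hpv]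
        exact hstep
  · intro v s m hm
    rw [PySem.Dict.get?_insert] at hm
    split at hm
    · rename_i hvs
      have hm' : m = e.1 := by injection hm with h2; omega
      subst hm'
      simp only [Prod.mk.injEq] at hvs
      obtain ⟨hv, hs⟩ := hvs
      subst hv; subst hs
      refine ⟨hse.1, by omega, fun p hp _ => ?_⟩
      rcases pvPushes_cover g k (mc.insert ((e.2.1, e.2.2)) e.1) e.1 e.2.1 e.2.2
          (by omega) p hp with hmem | ⟨mv, hmv, hle⟩
      · exact Or.inl ⟨e.1 + p.2, List.mem_append_right _ hmem, le_refl _⟩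
      · exact Or.inr ⟨mv, hmv, hle⟩
    · rename_i hvs
      have h1 := inv.2.1 v s m hm
      exact ⟨h1.1, h1.2.1, fun p hp hcond =>
        pvWitAt_record (h1.2.2 p hp hcond) hnp⟩
  · intro s
    rw [PySem.Dict.get?_insert]
    split
    · rename_i hvs
      simp only [Prod.mk.injEq] at hvs
      exact absurd hvs.1.symm hdst
    · exact inv.2.2.2 s

-- o must be none when the heap is empty
theorem pvONone {edges : List (List Int)} {g : PySem.Dict Int (List (Int × Int))}
    {src dst k : Int} {mc : PySem.Dict (Int × Int) Int} {o : Option Int}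
    (hg : ∀ p u, p ∈ g.getD u [] ↔ ∃ e ∈ edges, pvU e = u ∧ p = (pvV e, pvW e))
    (hw : ∀ e ∈ edges, 0 ≤ pvW e) (hk : 0 ≤ k) (hsd : src ≠ dst)
    (ho : pvOptAt (pvReach edges src (k + 1).toNat dst) o)
    (inv : pvInv edges g src dst k [] mc) : o = none := by
  cases o with
  | none => rfl
  | some m =>
    exfalso
    rcases pvReachND_of_reach edges src dst hw ho.1 with ⟨j, hj, c', _, hnd⟩
    rcases pvChainDst edges g src dst k [] mc hg hw hsd inv j c' hnd (by omega) with ⟨x, hx, _⟩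
    simp at hx

theorem pvMain (edges : List (List Int)) (g : PySem.Dict Int (List (Int × Int)))
    (src dst k : Int)
    (hg : ∀ p u, p ∈ g.getD u [] ↔ ∃ e ∈ edges, pvU e = u ∧ p = (pvV e, pvW e))
    (hw : ∀ e ∈ edges, 0 ≤ pvW e) (hk : 0 ≤ k) (hsd : src ≠ dst)
    (o : Option Int) (ho : pvOptAt (pvReach edges src (k + 1).toNat dst) o) :
    ∀ (N : Nat) (pq : List (Int × Int × Int)) (mc : PySem.Dict (Int × Int) Int),
      (pq.map (pvWt g k)).sum ≤ N →
      pvInv edges g src dst k pq mc →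
      pvALoop g dst k pq mc = o.getD (-1) := by
  intro N
  induction N with
  | zero =>
    intro pq mc hN inv
    match pq with
    | [] =>
      rw [pvALoop, pvONone hg hw hk hsd ho inv]
      rfl
    | h :: t =>
      exfalso
      have := pvWt_pos g k h
      simp only [List.map_cons, List.sum_cons] at hN
      omega
  | succ N ih =>
    intro pq mc hN inv
    match pq with
    | [] =>
      rw [pvALoop, pvONone hg hw hk hsd ho inv]
      rfl
    | h :: t =>
      rw [pvALoop]
      have hemem := pvMin_mem h t
      have hesum := pvSum_erase_eq (pvWt g k) hemem
      have hwtpos := pvWt_pos g k (pvMin h t)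
      have hse := inv.1 (pvMin h t) hemem
      have hs0 : 0 ≤ (pvMin h t).2.2 := hse.1
      have hs1 : (pvMin h t).2.2 ≤ k + 1 := hse.2.1
      split
      · -- node == dst: return cost
        rename_i hdst
        have hreach : pvReach edges src (k + 1).toNat dst (pvMin h t).1 := by
          rw [← hdst]
          exact pvReach_mono edges src (by omega) hse.2.2
        cases o with
        | none => exact absurd hreach (ho (pvMin h t).1)
        | some m =>
          have h1 : m ≤ (pvMin h t).1 := ho.2 _ hreach
          have h2 : (pvMin h t).1 ≤ m := by
            rcases pvReachND_of_reach edges src dst hw ho.1 with ⟨j, hj, c', hc', hnd⟩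
            rcases pvChainDst edges g src dst k (h :: t) mc hg hw hsd inv j c' hnd
              (by omega) with ⟨x, hx, hxle⟩
            have := pvMin_le h t x hx
            omega
          have : (pvMin h t).1 = m := by omega
          rw [this]
          rfl
      · split
        · -- stops > k: skip
          rename_i hdst hstop
          apply ih
          · omega
          · exact pvInv_stopskip inv hdst hstop hk
        · split
          · -- pruned: skip
            rename_i hdst hstop hpr
            unfold pvPruned at hpr
            rcases hm : mc.get? ((pvMin h t).2.1, (pvMin h t).2.2) with _ | m
            · rw [hm] at hpr; simp at hpr
            · rw [hm] at hpr
              simp only [decide_eq_true_eq] at hpr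
              apply ih
              · omega
              · exact pvInv_pruneskip inv hm hpr
          · -- record and push
            rename_i hdst hstop hpr
            have hps := pvPushes_wt_sum g k
              (mc.insert ((pvMin h t).2.1, (pvMin h t).2.2) (pvMin h t).1)
              (pvMin h t).1 (pvMin h t).2.1 (pvMin h t).2.2 (by omega)
            apply ih
            · rw [List.map_append, List.sum_append]
              have : pvWt g k ((pvMin h t).1, (pvMin h t).2.1, (pvMin h t).2.2)
                  = pvWt g k (pvMin h t) := rfl
              omega
            · exact pvInv_record hg inv hemem hdst hstop (Bool.of_not_eq_true hpr)



-- ===== VERDICT (by name: the statement is the Claim_ definition above) =====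
theorem pvInitInv (edges : List (List Int)) (src dst k : Int) (hk : 0 ≤ k) :
    pvInv edges (pvBuildGraph edges) src dst k [(0, src, 0)] PySem.Dict.empty := by
  refine ⟨?_, ?_, ?_, ?_⟩
  · intro x hx
    simp only [List.mem_singleton] at hx
    subst hx
    exact ⟨le_refl 0, by show (0 : Int) ≤ k + 1; omega, ⟨0, le_refl 0, rfl, rfl⟩⟩
  · intro v s m hm
    rw [PySem.Dict.get?_empty] at hm
    cases hm
  · exact Or.inl ⟨0, by simp, le_refl 0⟩
  · intro s
    exact PySem.Dict.get?_empty _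

theorem dijkstra_with_stops_spec : Claim_equal_dijkstra_with_stops := by
  intro n edges src dst k _ hpre
  unfold Spec_dijkstra_with_stops
  have hw : ∀ e ∈ edges, 0 ≤ pvW e := fun e he => (hpre e he).2
  have hg := pvBuildGraph_mem edges
  rw [pvAlt_eq]
  show pvALoop (pvBuildGraph edges) dst k [(0, src, 0)] PySem.Dict.empty
      = (pvBFD edges src (max (k + 1) 0).toNat).getD dst (-1)
  have hmin : pvMin ((0 : Int), src, (0 : Int)) ([] : List (Int × Int × Int))
      = ((0 : Int), src, (0 : Int)) := rfl
  by_cases hk : 0 ≤ k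
  · have hmax : (max (k + 1) 0).toNat = (k + 1).toNat := by omega
    rw [hmax]
    have ho := pvBFD_opt edges src (k + 1).toNat dst
    by_cases hsd : src = dst
    · -- first pop is (0, src, 0) and src == dst: A returns 0; B's optimum is 0
      have hreach0 : pvReach edges src (k + 1).toNat dst 0 :=
        ⟨0, by omega, hsd.symm, rfl⟩
      rw [pvALoop]
      rw [hmin]
      rw [if_pos (show ((0 : Int), src, (0 : Int)).2.1 = dst from hsd)]
      rcases hos : (pvBFD edges src (k + 1).toNat).get? dst with _ | m
      · rw [hos] at ho
        exact absurd hreach0 (ho 0)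
      · rw [hos] at ho
        have h1 : m ≤ 0 := ho.2 0 hreach0
        have h2 : 0 ≤ m := pvReach_nonneg edges src hw ho.1
        rw [PySem.Dict.getD_eq_get?_getD, hos]
        simp
        omega
    · rw [pvMain edges (pvBuildGraph edges) src dst k hg hw hk hsd
        ((pvBFD edges src (k + 1).toNat).get? dst) ho
        (([((0 : Int), src, (0 : Int))].map (pvWt (pvBuildGraph edges) k)).sum)
        [(0, src, 0)] PySem.Dict.empty (le_refl _) (pvInitInv edges src dst k hk)]
      rw [PySem.Dict.getD_eq_get?_getD]
  · -- k < 0: the only heap entry is stop-pruned (or src == dst returns 0); B does 0 rounds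
    have hmax : (max (k + 1) 0).toNat = 0 := by omega
    rw [hmax]
    have hbfd : pvBFD edges src 0 = PySem.Dict.empty.insert src 0 := by
      rw [pvBFD]
      simp
    rw [hbfd, PySem.Dict.getD_insert]
    rw [pvALoop]
    rw [hmin]
    by_cases hsd : src = dst
    · rw [if_pos (show ((0 : Int), src, (0 : Int)).2.1 = dst from hsd)]
      rw [if_pos hsd.symm]
    · rw [if_neg (show ¬ ((0 : Int), src, (0 : Int)).2.1 = dst from hsd)]
      rw [if_pos (show k < ((0 : Int), src, (0 : Int)).2.2 by simp; omega)]
      rw [show ([((0 : Int), src, (0 : Int))].erase ((0 : Int), src, (0 : Int)))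
          = ([] : List (Int × Int × Int)) by simp]
      rw [pvALoop]
      rw [if_neg (fun h => hsd h.symm), PySem.Dict.getD_empty]
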